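-- pv_equiv track=rewrite | github.com/dnfetheus/bppg | pb.py | decode_packet
-- ===== SOURCE A (Python) =====
-- from functools import reduce
--
-- def decode_packet(transmitted_packet: list, height: int, width: int) -> list:
--     parity_matrix = [[0 for _ in range(width)] for _ in range(height)]
--     data_bits_len = height * width
--     data_bits_with_column_len = data_bits_len + width
--     coded_bits_len = data_bits_with_column_len + height
--     parity_columns = [0 for _ in range(width)]
--     parity_rows = [0 for _ in range(height)]
--     decoded_packet = [0 for _ in range(len(transmitted_packet))]
--
--     n = 0
--
--     # iteração do pacote transmitido por bits codificados
--     for i in range(0, len(transmitted_packet), coded_bits_len):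
--         # preenchimento da matriz de dados
--         for j in range(height):
--             for k in range(width):
--                 parity_matrix[j][k] = transmitted_packet[i + width * j + k]
--
--         # preenchimento do array de bits de paridade de coluna
--         for j in range(width):
--             parity_columns[j] = transmitted_packet[i + data_bits_len + j]
--
--         # preenchimento do array de bits de paridade de linha
--         for j in range(height):
--             parity_rows[j] = transmitted_packet[i + data_bits_with_column_len + j]
--
--         error_in_column = -1
--
--         # verificação de erro em colunas
--         for j in range(width):
--             amt = 0
--
--             for k in range(height):
--                 amt = amt + parity_matrix[k][j]
--
--             if amt % 2 != parity_columns[j]: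
--                 error_in_column = j
--                 break
--
--         error_in_row = -1
--
--         # verificação de erro em linhas
--         for j in range(height):
--             amt = reduce(lambda x, y: x + y, parity_matrix[j])
--
--             if amt % 2 != parity_rows[j]:
--                 error_in_row = j
--                 break
--
--         # correção de erro
--         if error_in_row > -1 and error_in_column > -1:
--             if parity_matrix[error_in_row][error_in_column] == 1:
--                 parity_matrix[error_in_row][error_in_column] = 0
--             else:
--                 parity_matrix[error_in_row][error_in_column] = 1
--
--         # passagem de dados da matriz pro pacote decodificado
--         for j in range(height):
--             for k in range(width):
--                 decoded_packet[data_bits_len * n + width * j + k] = parity_matrix[j][k]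
--
--         n = n + 1
--
--     return decoded_packet
-- ===== SOURCE B (Python) =====
-- def decode_packet(transmitted_packet: list, height: int, width: int) -> list:
--     data_bits_len = height * width
--     coded_bits_len = data_bits_len + width + height
--
--     out = []
--
--     for i in range(0, len(transmitted_packet), coded_bits_len):
--         data = transmitted_packet[i:i + data_bits_len]
--         col_par = transmitted_packet[i + data_bits_len:i + data_bits_len + width]
--         row_par = transmitted_packet[i + data_bits_len + width:i + coded_bits_len]
--
--         # one pass over the data bits: per-column sums and per-row sums, no 2-D matrix
--         col_sums = [0] * width
--         row_sums = []
--         for r in range(0, len(data), width):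
--             row = data[r:r + width]
--             col_sums = [a + b for a, b in zip(col_sums, row)]
--             row_sums.append(sum(row))
--
--         error_in_column = next((j for j in range(width) if col_sums[j] % 2 != col_par[j]), -1)
--         error_in_row = next((j for j in range(height) if row_sums[j] % 2 != row_par[j]), -1)
--
--         if error_in_row > -1 and error_in_column > -1:
--             p = error_in_row * width + error_in_column
--             data[p] = 0 if data[p] == 1 else 1
--
--         out += data
--
--     return out + [0] * (len(transmitted_packet) - len(out))
-- ===== Notes on version B (the rewrite author's own statement) =====
-- stated objective: alternative
-- what changed: Replaces the 2-D parity matrix and its per-column re-scans with one pass over each block's data bits accumulating per-column and per-row sum arrays (zipWith-add over width-chunks), first-mismatch search via next() over the sum arrays, slices instead of index arithmetic, and the output built by concatenating corrected blocks plus zero padding instead of indexed writes into a preallocated array.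
-- outside the precondition, e.g. on decode_packet([1, 1], -2, -3): A returns [0, 0], B returns [1, 1, 1]
import Mathlib
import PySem

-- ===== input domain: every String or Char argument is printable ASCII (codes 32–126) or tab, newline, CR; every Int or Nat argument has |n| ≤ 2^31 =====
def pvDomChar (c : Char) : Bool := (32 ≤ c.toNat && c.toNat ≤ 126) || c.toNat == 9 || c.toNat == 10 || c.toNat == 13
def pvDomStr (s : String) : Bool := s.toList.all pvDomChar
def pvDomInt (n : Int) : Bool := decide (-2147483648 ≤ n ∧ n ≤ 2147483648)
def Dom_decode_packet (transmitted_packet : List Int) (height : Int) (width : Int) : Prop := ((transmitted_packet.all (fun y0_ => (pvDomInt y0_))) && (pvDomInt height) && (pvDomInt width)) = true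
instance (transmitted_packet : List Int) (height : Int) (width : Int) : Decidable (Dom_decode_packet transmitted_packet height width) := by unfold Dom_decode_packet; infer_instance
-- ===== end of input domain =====

-- B replaces A's 2-D parity matrix, nested per-column re-scans and indexed writes into a preallocated
-- array by one pass per block accumulating column/row sum arrays, find?-based first-mismatch search,
-- slices, and output built by concatenation plus zero padding (objective: alternative decomposition).

-- ===== PORT A =====
-- parity_matrix[j][k] = transmitted_packet[i + width*j + k]  (nested fill loops)
def aFillMatrix (tp : List Int) (i h w : Int) (pm : List (List Int)) : List (List Int) :=
  (PySem.List.pyRange 0 h 1).foldl (fun pm j =>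
    (PySem.List.pyRange 0 w 1).foldl (fun pm k =>
      PySem.List.pySetD pm j (PySem.List.pySetD (PySem.List.pyGetD pm j []) k
        (PySem.List.pyGetD tp (i + w * j + k) 0))) pm) pm

-- arr[j] = transmitted_packet[base + j] for j in range(n)  (used for both parity arrays)
def aFillArr (tp : List Int) (base n : Int) (arr : List Int) : List Int :=
  (PySem.List.pyRange 0 n 1).foldl (fun arr j =>
    PySem.List.pySetD arr j (PySem.List.pyGetD tp (base + j) 0)) arr

-- column-error loop with break: first j with column sum mismatch, else -1
def aColErr (pm : List (List Int)) (pc : List Int) (h : Int) : List Int → Int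
  | [] => -1
  | j :: rest =>
    let amt := (PySem.List.pyRange 0 h 1).foldl
      (fun amt k => amt + PySem.List.pyGetD (PySem.List.pyGetD pm k []) j 0) 0
    if PySem.Int.mod amt 2 != PySem.List.pyGetD pc j 0 then j else aColErr pm pc h rest

-- row-error loop with break; amt = reduce(lambda x, y: x + y, parity_matrix[j])
-- (the [] case is Python's TypeError on an empty reduce, unreached inside Pre_ where width ≥ 1)
def aRowErr (pm : List (List Int)) (pr : List Int) : List Int → Int
  | [] => -1
  | j :: rest =>
    let amt := match PySem.List.pyGetD pm j [] with
      | [] => 0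
      | x :: xs => xs.foldl (· + ·) x
    if PySem.Int.mod amt 2 != PySem.List.pyGetD pr j 0 then j else aRowErr pm pr rest

-- one iteration of A's outer loop, state (parity_matrix, parity_columns, parity_rows, decoded_packet, n)
def aStep (tp : List Int) (h w : Int)
    (st : List (List Int) × List Int × List Int × List Int × Int) (i : Int) :
    List (List Int) × List Int × List Int × List Int × Int :=
  let d := h * w
  let pm := aFillMatrix tp i h w st.1
  let pc := aFillArr tp (i + d) w st.2.1
  let pr := aFillArr tp (i + d + w) h st.2.2.1
  let dec := st.2.2.2.1
  let n := st.2.2.2.2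
  let ec := aColErr pm pc h (PySem.List.pyRange 0 w 1)
  let er := aRowErr pm pr (PySem.List.pyRange 0 h 1)
  let pm := if er > -1 ∧ ec > -1 then
      PySem.List.pySetD pm er (PySem.List.pySetD (PySem.List.pyGetD pm er []) ec
        (if PySem.List.pyGetD (PySem.List.pyGetD pm er []) ec 0 = 1 then 0 else 1))
    else pm
  let dec := (PySem.List.pyRange 0 h 1).foldl (fun dec j =>
      (PySem.List.pyRange 0 w 1).foldl (fun dec k =>
        PySem.List.pySetD dec (d * n + w * j + k)
          (PySem.List.pyGetD (PySem.List.pyGetD pm j []) k 0)) dec) dec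
  (pm, pc, pr, dec, n + 1)

def decode_packet (transmitted_packet : List Int) (height : Int) (width : Int) : List Int :=
  let d := height * width
  let c := d + width + height
  let pm0 := (PySem.List.pyRange 0 height 1).map
    (fun _ => (PySem.List.pyRange 0 width 1).map (fun _ => (0 : Int)))
  let pc0 := (PySem.List.pyRange 0 width 1).map (fun _ => (0 : Int))
  let pr0 := (PySem.List.pyRange 0 height 1).map (fun _ => (0 : Int))
  let dec0 := transmitted_packet.map (fun _ => (0 : Int))
  ((PySem.List.pyRange 0 transmitted_packet.length c).foldl (aStep transmitted_packet height width)
    (pm0, pc0, pr0, dec0, 0)).2.2.2.1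

-- ===== PORT B =====
-- one block: slices, a single accumulation pass (column sums via zipWith-add, row sums appended),
-- find?-based first mismatches, flip one bit of the flat data, append to the output
def bStep (tp : List Int) (h w : Int) (out : List Int) (i : Int) : List Int :=
  let d := h * w
  let c := d + w + h
  let data := PySem.List.slice tp (some i) (some (i + d))
  let colPar := PySem.List.slice tp (some (i + d)) (some (i + d + w))
  let rowPar := PySem.List.slice tp (some (i + d + w)) (some (i + c))
  let sums := (PySem.List.pyRange 0 data.length w).foldl
    (fun (cr : List Int × List Int) r =>
      let row := PySem.List.slice data (some r) (some (r + w))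
      (List.zipWith (· + ·) cr.1 row, cr.2 ++ [row.sum]))
    (List.replicate w.toNat 0, [])
  let ec := match (PySem.List.pyRange 0 w 1).find? (fun j =>
      PySem.Int.mod (PySem.List.pyGetD sums.1 j 0) 2 != PySem.List.pyGetD colPar j 0) with
    | some j => j
    | none => -1
  let er := match (PySem.List.pyRange 0 h 1).find? (fun j =>
      PySem.Int.mod (PySem.List.pyGetD sums.2 j 0) 2 != PySem.List.pyGetD rowPar j 0) with
    | some j => j
    | none => -1
  let data := if er > -1 ∧ ec > -1 then
      let p := er * w + ec
      PySem.List.pySetD data p (if PySem.List.pyGetD data p 0 = 1 then 0 else 1)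
    else data
  out ++ data

def decode_packet_alt (transmitted_packet : List Int) (height : Int) (width : Int) : List Int :=
  let c := height * width + width + height
  let out := (PySem.List.pyRange 0 transmitted_packet.length c).foldl
    (bStep transmitted_packet height width) []
  out ++ List.replicate ((transmitted_packet.length : Int) - out.length).toNat 0

-- ===== PRECONDITION & SPEC =====
-- Pre_ admits nonnegative height with positive width and a packet length that is a multiple of the
-- coded block size, plus the shapes where the block loop never runs (negative coded block size, or an
-- empty packet).  It excludes inputs where A raises (IndexError on a partial block, TypeError on an
-- empty reduce, ValueError on a zero range step) and the out-of-domain shapes with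
-- both dimensions negative yet positive block size, where no caller has a meaningful expectation:
-- A's empty loops yield an all-zero packet while B concatenates overlapping slices.
def Pre_decode_packet (transmitted_packet : List Int) (height : Int) (width : Int) : Prop :=
  (0 ≤ height ∧ 1 ≤ width ∧
    PySem.Int.mod (transmitted_packet.length) (height * width + width + height) = 0)
  ∨ (height * width + width + height < 0)
  ∨ (0 < height * width + width + height ∧ transmitted_packet = [])
instance (transmitted_packet : List Int) (height : Int) (width : Int) :
    Decidable (Pre_decode_packet transmitted_packet height width) := by
  unfold Pre_decode_packet; infer_instance

def pvWitness_decode_packet : List Int × Int × Int := ([1, 0, 0, 1, 1, 1, 0, 1], 2, 2)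

def Spec_decode_packet (transmitted_packet : List Int) (height : Int) (width : Int) (out : List Int) : Prop :=
  out = decode_packet_alt transmitted_packet height width
instance (transmitted_packet : List Int) (height : Int) (width : Int) (out : List Int) :
    Decidable (Spec_decode_packet transmitted_packet height width out) := by
  unfold Spec_decode_packet; infer_instance

-- ===== CLAIM (what is proved, stated in full; the proofs are below) =====
def Claim_equal_decode_packet : Prop := ∀ (transmitted_packet : List Int) (height : Int) (width : Int), Dom_decode_packet transmitted_packet height width → Pre_decode_packet transmitted_packet height width → Spec_decode_packet transmitted_packet height width (decode_packet transmitted_packet height width)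

-- ===== LEMMAS AND PROOFS =====

-- proof-side helpers
def gp (tp : List Int) (t : Int) : Int := PySem.List.pyGetD tp t 0

-- row j of the block starting at i, as A's filled parity matrix stores it
def mrow (tp : List Int) (i : Int) (W : Nat) (j : Nat) : List Int :=
  (List.range W).map (fun k => gp tp (i + ((W * j + k : Nat) : Int)))

lemma pyfold_to_nat {β : Type} (n : Nat) (F : β → Int → β) (b : β) :
    (PySem.List.pyRange 0 (n : Int) 1).foldl F b = List.foldl (fun b (k : Nat) => F b (k : Int)) b (List.range n) := by
  rw [PySem.List.pyRange_one, List.foldl_map]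
  simp only [zero_add, sub_zero, Int.toNat_natCast]

lemma foldl_set_off {α : Type} (W off : Nat) (f : Nat → α) (l : List α) (h : off + W ≤ l.length) :
    (List.range W).foldl (fun r k => r.set (off + k) (f k)) l
      = l.take off ++ (List.range W).map f ++ l.drop (off + W) := by
  induction W with
  | zero => simp
  | succ W ih =>
    rw [List.range_succ, List.foldl_append, ih (by omega)]
    simp only [List.foldl_cons, List.foldl_nil]
    have h1 : (l.take off ++ (List.range W).map f).length = off + W := by
      simp [List.length_take]; omega
    rw [List.set_append, if_neg (by omega), h1]
    have e0 : off + W - (off + W) = 0 := by omega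
    rw [e0, List.drop_eq_getElem_cons (by omega : off + W < l.length), List.set_cons_zero]
    have e1 : off + (W + 1) = (off + W) + 1 := by omega
    rw [e1, List.map_append]
    simp [List.append_assoc]

lemma foldl_set_rows (H W : Nat) (F : Nat → List Int → List Int) (M : Nat → List Int)
    (pm : List (List Int)) (hH : H ≤ pm.length) (hrows : ∀ r ∈ pm, r.length = W)
    (hF : ∀ j r, r.length = W → F j r = M j) :
    (List.range H).foldl (fun pm j => pm.set j (F j (pm.getD j []))) pm
      = (List.range H).map M ++ pm.drop H := by
  induction H with
  | zero => simp
  | succ H ih =>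
    rw [List.range_succ, List.foldl_append, ih (by omega)]
    simp only [List.foldl_cons, List.foldl_nil]
    have hH' : H < pm.length := by omega
    have hlen : ((List.range H).map M ++ pm.drop H).length = pm.length := by
      simp [List.length_drop]; omega
    have hgd : ((List.range H).map M ++ pm.drop H).getD H [] = pm[H] := by
      rw [List.getD_eq_getElem _ _ (by omega)]
      rw [List.getElem_append_right (by simp)]
      simp [List.getElem_drop]
    rw [hgd, hF H pm[H] (hrows _ (List.getElem_mem hH'))]
    rw [List.set_append, if_neg (by simp), List.length_map, List.length_range]
    have e0 : H - H = 0 := by omega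
    rw [e0, List.drop_eq_getElem_cons hH', List.set_cons_zero]
    simp [List.append_assoc]

lemma map_getD_self {α : Type} (l : List α) (d : α) :
    (List.range l.length).map (fun j => l.getD j d) = l := by
  apply List.ext_getElem (by simp)
  intro n h1 h2
  simp [List.getElem?_eq_getElem h2]

lemma foldl_add_from (x : Int) (xs : List Int) : xs.foldl (· + ·) x = x + xs.sum := by
  simpa using PySem.List.foldl_add xs (fun x => x) x

lemma find?_congr' {α : Type} (l : List α) (p q : α → Bool) (h : ∀ x ∈ l, p x = q x) :
    l.find? p = l.find? q := by
  induction l with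
  | nil => rfl
  | cons x xs ih =>
    simp only [List.find?_cons]
    rw [h x (by simp)]
    cases q x
    · exact ih (fun y hy => h y (by simp [hy]))
    · rfl

lemma flatten_map_range (H W : Nat) (f : Nat → Int) :
    (((List.range H).map (fun j => (List.range W).map (fun k => f (W * j + k))))).flatten
      = (List.range (H * W)).map f := by
  induction H with
  | zero => simp
  | succ H ih =>
    rw [List.range_succ, List.map_append, List.flatten_append, ih]
    have e1 : (H + 1) * W = H * W + W := by ring
    rw [e1, List.range_add, List.map_append]
    congr 1
    simp only [List.map_cons, List.map_nil, List.flatten_cons, List.flatten_nil,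
      List.append_nil, List.map_map]
    apply List.map_congr_left
    intro k _
    have e2 : W * H + k = H * W + k := by ring
    simp [Function.comp, e2]

lemma flatten_set (pm : List (List Int)) (W je ke : Nat) (v : Int)
    (hrows : ∀ r ∈ pm, r.length = W) (hje : je < pm.length) (hke : ke < W) :
    (pm.set je ((pm.getD je []).set ke v)).flatten = pm.flatten.set (W * je + ke) v := by
  induction pm generalizing je with
  | nil => simp at hje
  | cons r rest ih =>
    cases je with
    | zero =>
      simp only [List.getD_cons_zero, List.set_cons_zero, List.flatten_cons]
      rw [List.set_append, if_pos (by rw [hrows r (by simp)]; omega)]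
      norm_num
    | succ je =>
      simp only [List.getD_cons_succ, List.set_cons_succ, List.flatten_cons]
      rw [ih je (fun r hr => hrows r (by simp [hr])) (by simpa using hje)]
      rw [List.set_append, if_neg (by rw [hrows r (by simp), Nat.mul_succ]; omega)]
      rw [hrows r (by simp)]
      have e : W * (je + 1) + ke - W = W * je + ke := by rw [Nat.mul_succ]; omega
      rw [e]

lemma foldl_copy (H W B : Nat) (v : Nat → Nat → Int) (dec : List Int) (h : B + H * W ≤ dec.length) :
    (List.range H).foldl (fun dec j =>
        (List.range W).foldl (fun dec k => dec.set (B + W * j + k) (v j k)) dec) dec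
      = dec.take B ++ ((List.range H).map (fun j => (List.range W).map (v j))).flatten
          ++ dec.drop (B + H * W) := by
  have hflen : ∀ H', (((List.range H').map (fun j => (List.range W).map (v j))).flatten).length = H' * W := by
    intro H'
    simp [List.length_flatten, List.map_map, Function.comp_def]
  induction H generalizing dec with
  | zero => simp
  | succ H ih =>
    have hmul : W * H = H * W := Nat.mul_comm W H
    have h' : B + H * W + W ≤ dec.length := by nlinarith
    have hle : B + H * W ≤ dec.length := by omega
    rw [List.range_succ, List.foldl_append, ih dec hle]
    simp only [List.foldl_cons, List.foldl_nil]
    have hPlen : (dec.take B ++ ((List.range H).map (fun j => (List.range W).map (v j))).flatten).length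
        = B + H * W := by
      simp [hflen H, List.length_take]
      omega
    rw [foldl_set_off W (B + W * H) (v H) _ (by
      simp only [List.length_append, List.length_take, List.length_drop, hflen H, hmul]
      omega)]
    have htake : ((dec.take B ++ ((List.range H).map (fun j => (List.range W).map (v j))).flatten)
          ++ dec.drop (B + H * W)).take (B + W * H)
        = dec.take B ++ ((List.range H).map (fun j => (List.range W).map (v j))).flatten := by
      exact List.take_left' (by rw [hPlen, hmul])
    have hdrop : ((dec.take B ++ ((List.range H).map (fun j => (List.range W).map (v j))).flatten)
          ++ dec.drop (B + H * W)).drop (B + W * H + W)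
        = dec.drop (B + (H + 1) * W) := by
      rw [List.drop_append, List.drop_eq_nil_of_le (by rw [hPlen, hmul]; omega), hPlen,
        List.drop_drop]
      have e2 : (H + 1) * W = H * W + W := by ring
      have e : B + H * W + (B + W * H + W - (B + H * W)) = B + (H + 1) * W := by
        rw [hmul] at *
        omega
      rw [e]
      simp
    rw [htake, hdrop]
    simp [List.map_append, List.flatten_append, List.append_assoc]

lemma zip_fold (rows : List (List Int)) (init : List Int)
    (h : ∀ r ∈ rows, r.length = init.length) :
    rows.foldl (fun cs row => List.zipWith (· + ·) cs row) init
      = (List.range init.length).map (fun j => init.getD j 0 + (rows.map (fun r => r.getD j 0)).sum) := by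
  induction rows generalizing init with
  | nil => simpa using (map_getD_self init 0).symm
  | cons r rest ih =>
    simp only [List.foldl_cons]
    have hr : r.length = init.length := h r (by simp)
    have hzl : (List.zipWith (· + ·) init r).length = init.length := by
      simp [List.length_zipWith, hr]
    rw [ih _ (fun r' hr' => by rw [h r' (by simp [hr']), ← hzl]), hzl]
    apply List.map_congr_left
    intro j hj
    have hjl : j < init.length := List.mem_range.mp hj
    rw [List.getD_eq_getElem _ _ (by omega : j < (List.zipWith (· + ·) init r).length),
      List.getElem_zipWith, List.getD_eq_getElem _ _ hjl]
    have hrj : r.getD j 0 = r[j]'(by omega) := List.getD_eq_getElem _ _ (by omega)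
    simp only [List.map_cons, List.sum_cons, hrj]
    ring

lemma slice_map (tp : List Int) (a : Int) (L : Nat) (h0 : 0 ≤ a) (h1 : a.toNat + L ≤ tp.length) :
    PySem.List.slice tp (some a) (some (a + L)) = List.map (fun (t : Nat) => gp tp (a + (t : Int))) (List.range L) := by
  rw [PySem.List.slice_toNat tp h0 (by omega)]
  have e1 : (a + (L : Int)).toNat - a.toNat = L := by omega
  rw [e1]
  apply List.ext_getElem (by simp [List.length_take, List.length_drop]; omega)
  intro t h1 h2
  simp only [List.getElem_take, List.getElem_drop, List.getElem_map, List.getElem_range]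
  have ht : t < L := by simpa using h2
  rw [gp, PySem.List.pyGetD_eq_getElem tp 0 (by omega) (by omega)]
  congr 1
  omega

lemma pyRange_step (H W : Nat) (hW : 0 < W) :
    PySem.List.pyRange 0 ((H * W : Nat) : Int) ((W : Nat) : Int)
      = (List.range H).map (fun j => ((W * j : Nat) : Int)) := by
  rw [PySem.List.pyRange_of_pos _ _ (by exact_mod_cast hW)]
  rcases Nat.eq_zero_or_pos H with hH | hH
  · subst hH; simp
  · rw [if_pos (by push_cast; positivity)]
    have e1 : ((H * W : Nat) : Int) - 0 + (W : Int) - 1 = ((H * W + W - 1 : Nat) : Int) := by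
      push_cast [Nat.cast_sub (by nlinarith : 1 ≤ H * W + W)]; ring
    rw [e1, ← Int.natCast_div, Int.toNat_natCast]
    have e2 : (H * W + W - 1) / W = H := by
      apply Nat.div_eq_of_lt_le
      · rw [Nat.add_sub_assoc hW]
        exact Nat.le_add_right _ _
      · have e3 : (H + 1) * W = H * W + W := by ring
        rw [e3, Nat.add_sub_assoc hW]
        exact Nat.add_lt_add_left (Nat.sub_lt hW Nat.one_pos) _
    rw [e2]
    apply List.map_congr_left
    intro j _
    push_cast
    ring

lemma foldl_set0 {α : Type} (W : Nat) (f : Nat → α) (l : List α) (h : W ≤ l.length) :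
    (List.range W).foldl (fun r k => r.set k (f k)) l = (List.range W).map f ++ l.drop W := by
  have := foldl_set_off W 0 f l (by omega)
  simpa using this

lemma foldl_set_outer' {κ : Type} (ks : List κ) (j : Nat) (u : List Int → κ → List Int)
    (pm : List (List Int)) :
    ks.foldl (fun pm k => pm.set j (u (pm.getD j []) k)) pm = pm.set j (ks.foldl u (pm.getD j [])) := by
  by_cases hj : j < pm.length
  · induction ks generalizing pm with
    | nil =>
      rw [List.getD_eq_getElem _ _ hj]
      exact (List.set_getElem_self hj).symm
    | cons k rest ih =>
      simp only [List.foldl_cons]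
      rw [ih _ (by simpa using hj)]
      have hj' : j < (pm.set j (u (pm.getD j []) k)).length := by simpa using hj
      rw [List.getD_eq_getElem _ _ hj', List.getElem_set_self, List.set_set]
  · have hset : ∀ (l : List Int), pm.set j l = pm :=
      fun l => List.set_eq_of_length_le (by omega)
    rw [hset]
    induction ks generalizing pm with
    | nil => rfl
    | cons k rest ih =>
      simp only [List.foldl_cons]
      rw [List.set_eq_of_length_le (by omega)]
      exact ih pm hj (fun l => List.set_eq_of_length_le (by omega))

lemma gp_map_range (L : Nat) (f : Nat → Int) (m : Nat) (hm : m < L) :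
    gp (List.map (fun (t : Nat) => f t) (List.range L)) ((m : Nat) : Int) = f m := by
  rw [gp, PySem.List.pyGetD_natCast, PySem.List.getD_map_range f L m 0 hm]

lemma aFillArr_eq (tp : List Int) (base : Int) (W : Nat) (arr : List Int) (hlen : arr.length = W) :
    aFillArr tp base (W : Int) arr = List.map (fun (j : Nat) => gp tp (base + (j : Int))) (List.range W) := by
  unfold aFillArr
  rw [pyfold_to_nat W]
  have hb : (fun (b : List Int) (k : Nat) => PySem.List.pySetD b (k : Int) (PySem.List.pyGetD tp (base + (k : Int)) 0))
      = fun b k => b.set k (gp tp (base + (k : Int))) := by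
    funext b k
    rw [PySem.List.pySetD_natCast, gp]
  rw [hb, foldl_set0 W _ arr (by omega)]
  simp [hlen]

lemma aFillMatrix_eq (tp : List Int) (i : Int) (H W : Nat) (pm : List (List Int))
    (hpm : pm.length = H) (hrows : ∀ r ∈ pm, r.length = W) :
    aFillMatrix tp i (H : Int) (W : Int) pm = (List.range H).map (mrow tp i W) := by
  unfold aFillMatrix
  rw [pyfold_to_nat H]
  have hb : (fun (pm : List (List Int)) (j : Nat) =>
        (PySem.List.pyRange 0 (W : Int) 1).foldl (fun pm k =>
          PySem.List.pySetD pm (j : Int) (PySem.List.pySetD (PySem.List.pyGetD pm (j : Int) []) k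
            (PySem.List.pyGetD tp (i + (W : Int) * (j : Int) + k) 0))) pm)
      = fun pm j => pm.set j ((List.range W).foldl
          (fun r (k : Nat) => r.set k (gp tp (i + ((W * j + k : Nat) : Int)))) (pm.getD j [])) := by
    funext pm j
    rw [pyfold_to_nat W]
    simp only [PySem.List.pySetD_natCast, PySem.List.pyGetD_natCast]
    rw [foldl_set_outer' (List.range W) j
      (fun r (k : Nat) => r.set k (PySem.List.pyGetD tp (i + (W : Int) * (j : Int) + (k : Int)) 0)) pm]
    have ef : (fun (r : List Int) (k : Nat) =>
          r.set k (PySem.List.pyGetD tp (i + (W : Int) * (j : Int) + (k : Int)) 0))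
        = fun r k => r.set k (gp tp (i + ((W * j + k : Nat) : Int))) := by
      funext r k
      rw [gp]
      congr 2
      push_cast
      ring
    rw [ef]
  rw [hb]
  rw [foldl_set_rows H W
    (fun j r => (List.range W).foldl (fun r (k : Nat) => r.set k (gp tp (i + ((W * j + k : Nat) : Int)))) r)
    (mrow tp i W) pm (by omega) hrows
    (fun j r hr => by dsimp only; rw [foldl_set0 W _ r (by omega)]; simp [hr, mrow])]
  simp [hpm]

lemma aColErr_eq (pm : List (List Int)) (pc : List Int) (h : Int) (js : List Int) :
    aColErr pm pc h js
      = (match js.find? (fun j => PySem.Int.mod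
            ((PySem.List.pyRange 0 h 1).foldl
              (fun amt k => amt + PySem.List.pyGetD (PySem.List.pyGetD pm k []) j 0) 0) 2
          != PySem.List.pyGetD pc j 0) with
        | some j => j
        | none => -1) := by
  induction js with
  | nil => rfl
  | cons j rest ih =>
    rw [List.find?_cons]
    by_cases hc : (PySem.Int.mod
        ((PySem.List.pyRange 0 h 1).foldl
          (fun amt k => amt + PySem.List.pyGetD (PySem.List.pyGetD pm k []) j 0) 0) 2
      != PySem.List.pyGetD pc j 0) = true
    · simp only [aColErr, hc, if_true]
    · simp only [aColErr, hc, Bool.false_eq_true, if_false, ih]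

lemma aRowErr_eq (pm : List (List Int)) (pr : List Int) (js : List Int) :
    aRowErr pm pr js
      = (match js.find? (fun j => PySem.Int.mod
            (match PySem.List.pyGetD pm j [] with
              | [] => 0
              | x :: xs => xs.foldl (· + ·) x) 2
          != PySem.List.pyGetD pr j 0) with
        | some j => j
        | none => -1) := by
  induction js with
  | nil => rfl
  | cons j rest ih =>
    rw [List.find?_cons]
    by_cases hc : (PySem.Int.mod
        (match PySem.List.pyGetD pm j [] with
          | [] => 0
          | x :: xs => xs.foldl (· + ·) x) 2
      != PySem.List.pyGetD pr j 0) = true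
    · simp only [aRowErr, hc, if_true]
    · simp only [aRowErr, hc, Bool.false_eq_true, if_false, ih]



-- one block: A's loop body and B's loop body produce the same corrected block
lemma step_eq (tp : List Int) (H W N : Nat) (hW : 1 ≤ W)
    (hlen : (H * W + W + H) * (N + 1) ≤ tp.length)
    (pm : List (List Int)) (pc pr out : List Int)
    (hpm : pm.length = H) (hrows : ∀ r ∈ pm, r.length = W)
    (hpc : pc.length = W) (hpr : pr.length = H)
    (hout : out.length = N * (H * W)) :
    ∃ pm' pc' pr' blk,
      pm'.length = H ∧ (∀ r ∈ pm', r.length = W) ∧ pc'.length = W ∧ pr'.length = H ∧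
      blk.length = H * W ∧
      aStep tp (H : Int) (W : Int)
          (pm, pc, pr, out ++ List.replicate (tp.length - N * (H * W)) 0, (N : Int))
          (((H * W + W + H) * N : Nat) : Int)
        = (pm', pc', pr', (out ++ blk) ++ List.replicate (tp.length - (N + 1) * (H * W)) 0, (N : Int) + 1) ∧
      bStep tp (H : Int) (W : Int) out (((H * W + W + H) * N : Nat) : Int) = out ++ blk := by
  have hCN : (H * W + W + H) * (N + 1) = (H * W + W + H) * N + (H * W + W + H) := by ring
  set i : Int := (((H * W + W + H) * N : Nat) : Int) with hi
  have hi0 : 0 ≤ i := by positivity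
  have hitn : i.toNat = (H * W + W + H) * N := Int.toNat_natCast _
  set f : Nat → Int := fun t => gp tp (i + (t : Int)) with hf
  set mrowi : Nat → List Int := mrow tp i W with hmrow
  have hmrowlen : ∀ j, (mrowi j).length = W := by intro j; simp [hmrow, mrow]
  have hmrowelt : ∀ j k, k < W → (mrowi j).getD k 0 = gp tp (i + ((W * j + k : Nat) : Int)) := by
    intro j k hk
    rw [hmrow, mrow, PySem.List.getD_map_range _ W k 0 hk]
  -- the two casts that appear in both step bodies
  have e_d : ((H : Int) * (W : Int)) = ((H * W : Nat) : Int) := by push_cast; ring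
  have e_c : i + (((H * W : Nat) : Int) + (W : Int) + (H : Int))
      = i + ((H * W : Nat) : Int) + (W : Int) + (H : Int) := by ring
  -- A: matrix fill
  have hpmF := aFillMatrix_eq tp i H W pm hpm hrows
  -- A and B: parity arrays / slices
  have hdata : PySem.List.slice tp (some i) (some (i + ((H * W : Nat) : Int)))
      = List.map f (List.range (H * W)) := by
    rw [slice_map tp i (H * W) hi0 (by omega)]
  have hcolP : PySem.List.slice tp (some (i + ((H * W : Nat) : Int)))
        (some (i + ((H * W : Nat) : Int) + (W : Int)))
      = List.map (fun (j : Nat) => gp tp (i + ((H * W : Nat) : Int) + (j : Int))) (List.range W) := by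
    rw [slice_map tp (i + ((H * W : Nat) : Int)) W (by positivity) (by omega)]
  have hrowP : PySem.List.slice tp (some (i + ((H * W : Nat) : Int) + (W : Int)))
        (some (i + ((H * W : Nat) : Int) + (W : Int) + (H : Int)))
      = List.map (fun (j : Nat) => gp tp (i + ((H * W : Nat) : Int) + (W : Int) + (j : Int))) (List.range H) := by
    rw [slice_map tp (i + ((H * W : Nat) : Int) + (W : Int)) H (by positivity) (by omega)]
  have hpcF : aFillArr tp (i + ((H * W : Nat) : Int)) (W : Int) pc
      = List.map (fun (j : Nat) => gp tp (i + ((H * W : Nat) : Int) + (j : Int))) (List.range W) :=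
    aFillArr_eq tp _ W pc hpc
  have hprF : aFillArr tp (i + ((H * W : Nat) : Int) + (W : Int)) (H : Int) pr
      = List.map (fun (j : Nat) => gp tp (i + ((H * W : Nat) : Int) + (W : Int) + (j : Int))) (List.range H) :=
    aFillArr_eq tp _ H pr hpr
  -- B: the accumulated column/row sums
  have hrowslice : ∀ (j : Nat), j ∈ List.range H →
      PySem.List.slice (List.map f (List.range (H * W))) (some ((W * j : Nat) : Int))
        (some (((W * j : Nat) : Int) + (W : Int))) = mrowi j := by
    intro j hj
    have hjH : j < H := List.mem_range.mp hj
    rw [slice_map _ ((W * j : Nat) : Int) W (by positivity)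
      (by rw [Int.toNat_natCast]; simp; nlinarith)]
    rw [hmrow, mrow]
    apply List.map_congr_left
    intro k hk
    have hkW : k < W := List.mem_range.mp hk
    have e : ((W * j : Nat) : Int) + (k : Int) = ((W * j + k : Nat) : Int) := by push_cast; ring
    rw [e, hf]
    exact gp_map_range (H * W) _ (W * j + k) (by nlinarith)
  have hcolsum : (List.range H).foldl (fun cs j => List.zipWith (· + ·) cs (mrowi j))
        (List.replicate W 0)
      = List.map (fun (j : Nat) =>
          (0 : Int) + (((List.range H).map mrowi).map (fun r => r.getD j 0)).sum) (List.range W) := by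
    rw [← List.foldl_map (f := mrowi) (g := fun cs row => List.zipWith (· + ·) cs row)]
    rw [zip_fold _ _ (by intro r hr; simp at hr; obtain ⟨j, _, rfl⟩ := hr; simp [hmrowlen])]
    simp only [List.length_replicate]
    apply List.map_congr_left
    intro j hj
    rw [List.getD_replicate (0 : Int) (List.mem_range.mp hj)]
  have hrowsum : (List.range H).foldl (fun rs j => rs ++ [(mrowi j).sum]) ([] : List Int)
      = (List.range H).map (fun j => (mrowi j).sum) := by
    simpa using PySem.List.foldl_append_singleton_eq_map (fun j => (mrowi j).sum) (List.range H) []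
  -- common abbreviations for the per-block lists
  set colP : List Int :=
    List.map (fun (j : Nat) => gp tp (i + ((H * W : Nat) : Int) + (j : Int))) (List.range W) with hcolPdef
  set rowP : List Int :=
    List.map (fun (j : Nat) => gp tp (i + ((H * W : Nat) : Int) + (W : Int) + (j : Int))) (List.range H) with hrowPdef
  set csum : List Int :=
    List.map (fun (j : Nat) =>
      (0 : Int) + (((List.range H).map mrowi).map (fun r => r.getD j 0)).sum) (List.range W) with hcsumdef
  set rsum : List Int := (List.range H).map (fun j => (mrowi j).sum) with hrsumdef
  -- A's column mismatch test agrees with B's, pointwise on range(width)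
  have hpointc : ∀ x ∈ PySem.List.pyRange 0 (W : Int) 1,
      (PySem.Int.mod ((PySem.List.pyRange 0 (H : Int) 1).foldl
          (fun amt k => amt + PySem.List.pyGetD (PySem.List.pyGetD ((List.range H).map mrowi) k []) x 0) 0) 2
        != PySem.List.pyGetD colP x 0)
      = (PySem.Int.mod (PySem.List.pyGetD csum x 0) 2 != PySem.List.pyGetD colP x 0) := by
    intro x hx
    obtain ⟨hx0, hxW⟩ := PySem.List.mem_pyRange_one.mp hx
    have hxe : x = ((x.toNat : Nat) : Int) := by omega
    have hxnW : x.toNat < W := by omega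
    congr 1
    rw [hxe, pyfold_to_nat H]
    rw [PySem.List.foldl_congr_mem (List.range H) _
      (fun amt (k : Nat) => amt + gp tp (i + ((W * k + x.toNat : Nat) : Int))) 0
      (by
        intro acc k hk
        have hkH : k < H := List.mem_range.mp hk
        rw [PySem.List.pyGetD_natCast ((List.range H).map mrowi) k [],
          PySem.List.getD_map_range mrowi H k [] hkH,
          PySem.List.pyGetD_natCast (mrowi k) x.toNat 0, hmrowelt k x.toNat hxnW])]
    rw [PySem.List.foldl_add (List.range H) (fun k => gp tp (i + ((W * k + x.toNat : Nat) : Int))) 0]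
    rw [PySem.List.pyGetD_natCast csum x.toNat 0, hcsumdef,
      PySem.List.getD_map_range _ W x.toNat 0 hxnW]
    rw [List.map_map]
    have hmc : List.map (fun k => gp tp (i + ((W * k + x.toNat : Nat) : Int))) (List.range H)
        = List.map ((fun r => r.getD x.toNat 0) ∘ mrowi) (List.range H) :=
      List.map_congr_left (fun k hk => by
        simp only [Function.comp_apply]
        exact (hmrowelt k x.toNat hxnW).symm)
    rw [hmc]
  -- A's row mismatch test agrees with B's, pointwise on range(height)
  have hpointr : ∀ x ∈ PySem.List.pyRange 0 (H : Int) 1,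
      (PySem.Int.mod (match PySem.List.pyGetD ((List.range H).map mrowi) x [] with
          | [] => 0
          | y :: ys => ys.foldl (· + ·) y) 2
        != PySem.List.pyGetD rowP x 0)
      = (PySem.Int.mod (PySem.List.pyGetD rsum x 0) 2 != PySem.List.pyGetD rowP x 0) := by
    intro x hx
    obtain ⟨hx0, hxH⟩ := PySem.List.mem_pyRange_one.mp hx
    have hxe : x = ((x.toNat : Nat) : Int) := by omega
    have hxnH : x.toNat < H := by omega
    congr 1
    rw [hxe, PySem.List.pyGetD_natCast ((List.range H).map mrowi) x.toNat [],
      PySem.List.getD_map_range mrowi H x.toNat [] hxnH,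
      PySem.List.pyGetD_natCast rsum x.toNat 0, hrsumdef,
      PySem.List.getD_map_range _ H x.toNat 0 hxnH]
    rcases hm : mrowi x.toNat with _ | ⟨y, ys⟩
    · exfalso
      have := hmrowlen x.toNat
      rw [hm] at this
      simp at this
      omega
    · rw [show (match y :: ys with | [] => (0 : Int) | y :: ys => ys.foldl (· + ·) y)
          = ys.foldl (· + ·) y from rfl]
      rw [foldl_add_from y ys, List.sum_cons]
  -- the copy-back loop splices the (corrected) matrix into the zero region
  have hcopy : ∀ (pmC : List (List Int)), pmC.length = H → (∀ r ∈ pmC, r.length = W) →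
      (PySem.List.pyRange 0 (H : Int) 1).foldl (fun dec j =>
          (PySem.List.pyRange 0 (W : Int) 1).foldl (fun dec k =>
            PySem.List.pySetD dec (((H * W : Nat) : Int) * (N : Int) + (W : Int) * j + k)
              (PySem.List.pyGetD (PySem.List.pyGetD pmC j []) k 0)) dec)
        (out ++ List.replicate (tp.length - N * (H * W)) 0)
      = (out ++ pmC.flatten) ++ List.replicate (tp.length - (N + 1) * (H * W)) 0 := by
    intro pmC hpmC hrowsC
    have hNHW : N * (H * W) + H * W ≤ tp.length := by nlinarith
    rw [pyfold_to_nat H]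
    have hb : (fun (dec : List Int) (j : Nat) =>
          (PySem.List.pyRange 0 (W : Int) 1).foldl (fun dec k =>
            PySem.List.pySetD dec (((H * W : Nat) : Int) * (N : Int) + (W : Int) * (j : Int) + k)
              (PySem.List.pyGetD (PySem.List.pyGetD pmC (j : Int) []) k 0)) dec)
        = fun dec j => (List.range W).foldl (fun dec k =>
            dec.set (N * (H * W) + W * j + k) ((pmC.getD j []).getD k 0)) dec := by
      funext dec j
      rw [pyfold_to_nat W]
      congr 1
      funext dec k
      rw [PySem.List.pyGetD_natCast pmC j [], PySem.List.pyGetD_natCast (pmC.getD j []) k 0]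
      have e : ((H * W : Nat) : Int) * (N : Int) + (W : Int) * (j : Int) + (k : Int)
          = ((N * (H * W) + W * j + k : Nat) : Int) := by push_cast; ring
      rw [e, PySem.List.pySetD_natCast]
    rw [hb]
    rw [foldl_copy H W (N * (H * W)) (fun j k => (pmC.getD j []).getD k 0) _
      (by simp only [List.length_append, List.length_replicate, hout]; omega)]
    have hflat : ((List.range H).map (fun j => (List.range W).map (fun k => (pmC.getD j []).getD k 0))).flatten
        = pmC.flatten := by
      congr 1
      have hrw : ∀ j ∈ List.range H, (List.range W).map (fun k => (pmC.getD j []).getD k 0) = pmC.getD j [] := by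
        intro j hj
        have hjH : j < H := List.mem_range.mp hj
        have hrl : (pmC.getD j []).length = W := by
          rw [List.getD_eq_getElem _ _ (by omega)]
          exact hrowsC _ (List.getElem_mem (by omega))
        rw [← hrl]
        exact map_getD_self (pmC.getD j []) 0
      rw [List.map_congr_left hrw]
      rw [← hpmC]
      exact map_getD_self pmC []
    rw [hflat]
    have htk : (out ++ List.replicate (tp.length - N * (H * W)) 0).take (N * (H * W)) = out :=
      List.take_left' hout
    have hdr : (out ++ List.replicate (tp.length - N * (H * W)) 0).drop (N * (H * W) + H * W)
        = List.replicate (tp.length - (N + 1) * (H * W)) 0 := by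
      rw [List.drop_append, List.drop_eq_nil_of_le (by omega), List.drop_replicate]
      simp only [List.nil_append, hout]
      rw [show tp.length - N * (H * W) - (N * (H * W) + H * W - N * (H * W)) = tp.length - (N + 1) * (H * W) from by
        have e : (N + 1) * (H * W) = N * (H * W) + H * W := by ring
        omega]
    rw [htk, hdr]
  -- the data block as a flat list
  have hflatmap : ((List.range H).map mrowi).flatten = List.map f (List.range (H * W)) := by
    rw [hmrow]
    exact flatten_map_range H W f
  have hmemrow : ∀ r ∈ (List.range H).map mrowi, r.length = W := by
    intro r hr
    simp only [List.mem_map, List.mem_range] at hr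
    obtain ⟨j, _, rfl⟩ := hr
    exact hmrowlen j
  have hpmFlen : ((List.range H).map mrowi).length = H := by simp
  -- A's two searches in the common find? form
  have hecA : aColErr ((List.range H).map mrowi) colP (H : Int) (PySem.List.pyRange 0 (W : Int) 1)
      = (match (PySem.List.pyRange 0 (W : Int) 1).find?
          (fun j => PySem.Int.mod (PySem.List.pyGetD csum j 0) 2 != PySem.List.pyGetD colP j 0) with
        | some j => j | none => -1) := by
    rw [aColErr_eq]
    rw [find?_congr' _ _ _ hpointc]
  have herA : aRowErr ((List.range H).map mrowi) rowP (PySem.List.pyRange 0 (H : Int) 1)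
      = (match (PySem.List.pyRange 0 (H : Int) 1).find?
          (fun j => PySem.Int.mod (PySem.List.pyGetD rsum j 0) 2 != PySem.List.pyGetD rowP j 0) with
        | some j => j | none => -1) := by
    rw [aRowErr_eq]
    rw [find?_congr' _ _ _ hpointr]
  -- B's accumulation pass, reduced to the same sums
  have hBsums : (PySem.List.pyRange 0 ((List.map f (List.range (H * W))).length : Int) (W : Int)).foldl
        (fun (cr : List Int × List Int) r =>
          (List.zipWith (· + ·) cr.1 (PySem.List.slice (List.map f (List.range (H * W))) (some r) (some (r + (W : Int)))),
            cr.2 ++ [(PySem.List.slice (List.map f (List.range (H * W))) (some r) (some (r + (W : Int)))).sum]))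
        (List.replicate ((W : Int)).toNat 0, ([] : List Int))
      = (csum, rsum) := by
    simp only [List.length_map, List.length_range]
    rw [pyRange_step H W (by omega), List.foldl_map, Int.toNat_natCast]
    rw [PySem.List.foldl_congr_mem (List.range H) _
      (fun (cr : List Int × List Int) (j : Nat) =>
        (List.zipWith (· + ·) cr.1 (mrowi j), cr.2 ++ [(mrowi j).sum]))
      (List.replicate W 0, [])
      (by
        intro acc j hj
        rw [hrowslice j hj])]
    rw [PySem.List.foldl_prod_mk (fun cs (j : Nat) => List.zipWith (· + ·) cs (mrowi j))
      (fun rs (j : Nat) => rs ++ [(mrowi j).sum]) (List.range H) (List.replicate W 0) []]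
    rw [hcolsum, hrowsum]
  rcases hfc : (PySem.List.pyRange 0 (W : Int) 1).find?
      (fun j => PySem.Int.mod (PySem.List.pyGetD csum j 0) 2 != PySem.List.pyGetD colP j 0) with _ | jc <;>
    rcases hfr : (PySem.List.pyRange 0 (H : Int) 1).find?
      (fun j => PySem.Int.mod (PySem.List.pyGetD rsum j 0) 2 != PySem.List.pyGetD rowP j 0) with _ | jr
  case none.none =>
    refine ⟨(List.range H).map mrowi, colP, rowP, List.map f (List.range (H * W)),
      hpmFlen, hmemrow, by simp [hcolPdef], by simp [hrowPdef], by simp, ?_, ?_⟩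
    · simp only [aStep]
      rw [e_d, hpmF, hpcF, hprF, hecA, herA, hfc, hfr]
      dsimp only
      rw [if_neg (by rintro ⟨h1, h2⟩; omega)]
      rw [hcopy ((List.range H).map mrowi) hpmFlen hmemrow, hflatmap]
    · simp only [bStep]
      rw [e_d, e_c, hdata, hcolP, hrowP, hBsums]
      rw [hfc, hfr]
      dsimp only
      rw [if_neg (by rintro ⟨h1, h2⟩; omega)]
  case none.some =>
    refine ⟨(List.range H).map mrowi, colP, rowP, List.map f (List.range (H * W)),
      hpmFlen, hmemrow, by simp [hcolPdef], by simp [hrowPdef], by simp, ?_, ?_⟩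
    · simp only [aStep]
      rw [e_d, hpmF, hpcF, hprF, hecA, herA, hfc, hfr]
      dsimp only
      rw [if_neg (by rintro ⟨h1, h2⟩; omega)]
      rw [hcopy ((List.range H).map mrowi) hpmFlen hmemrow, hflatmap]
    · simp only [bStep]
      rw [e_d, e_c, hdata, hcolP, hrowP, hBsums]
      rw [hfc, hfr]
      dsimp only
      rw [if_neg (by rintro ⟨h1, h2⟩; omega)]
  case some.none =>
    refine ⟨(List.range H).map mrowi, colP, rowP, List.map f (List.range (H * W)),
      hpmFlen, hmemrow, by simp [hcolPdef], by simp [hrowPdef], by simp, ?_, ?_⟩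
    · simp only [aStep]
      rw [e_d, hpmF, hpcF, hprF, hecA, herA, hfc, hfr]
      dsimp only
      rw [if_neg (by rintro ⟨h1, h2⟩; omega)]
      rw [hcopy ((List.range H).map mrowi) hpmFlen hmemrow, hflatmap]
    · simp only [bStep]
      rw [e_d, e_c, hdata, hcolP, hrowP, hBsums]
      rw [hfc, hfr]
      dsimp only
      rw [if_neg (by rintro ⟨h1, h2⟩; omega)]
  case some.some =>
    obtain ⟨hjc0, hjcW⟩ := PySem.List.mem_pyRange_one.mp (List.mem_of_find?_eq_some hfc)
    obtain ⟨hjr0, hjrH⟩ := PySem.List.mem_pyRange_one.mp (List.mem_of_find?_eq_some hfr)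
    have hjce : jc = ((jc.toNat : Nat) : Int) := by omega
    have hjre : jr = ((jr.toNat : Nat) : Int) := by omega
    have hkeW : jc.toNat < W := by omega
    have hjeH : jr.toNat < H := by omega
    refine ⟨((List.range H).map mrowi).set jr.toNat ((mrowi jr.toNat).set jc.toNat
        (if gp tp (i + ((W * jr.toNat + jc.toNat : Nat) : Int)) = 1 then (0 : Int) else 1)),
      colP, rowP,
      (List.map f (List.range (H * W))).set (W * jr.toNat + jc.toNat)
        (if gp tp (i + ((W * jr.toNat + jc.toNat : Nat) : Int)) = 1 then (0 : Int) else 1),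
      by simp [hpmFlen], ?_, by simp [hcolPdef], by simp [hrowPdef], by simp, ?_, ?_⟩
    · intro r hr
      rcases List.mem_or_eq_of_mem_set hr with h | rfl
      · exact hmemrow r h
      · simp [hmrowlen]
    · simp only [aStep]
      rw [e_d, hpmF, hpcF, hprF, hecA, herA, hfc, hfr]
      dsimp only
      rw [if_pos ⟨by omega, by omega⟩]
      rw [hjre, hjce]
      rw [PySem.List.pyGetD_natCast ((List.range H).map mrowi) jr.toNat [],
        PySem.List.getD_map_range mrowi H jr.toNat [] hjeH]
      rw [PySem.List.pyGetD_natCast (mrowi jr.toNat) jc.toNat 0, hmrowelt jr.toNat jc.toNat hkeW]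
      rw [PySem.List.pySetD_natCast (mrowi jr.toNat) jc.toNat _]
      rw [PySem.List.pySetD_natCast ((List.range H).map mrowi) jr.toNat _]
      rw [hcopy _ (by simp [hpmFlen]) (by
        intro r hr
        rcases List.mem_or_eq_of_mem_set hr with h | rfl
        · exact hmemrow r h
        · simp [hmrowlen])]
      have hflatC : (((List.range H).map mrowi).set jr.toNat ((mrowi jr.toNat).set jc.toNat
            (if gp tp (i + ((W * jr.toNat + jc.toNat : Nat) : Int)) = 1 then (0 : Int) else 1))).flatten
          = (List.map f (List.range (H * W))).set (W * jr.toNat + jc.toNat)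
            (if gp tp (i + ((W * jr.toNat + jc.toNat : Nat) : Int)) = 1 then (0 : Int) else 1) := by
        rw [show (mrowi jr.toNat) = ((List.range H).map mrowi).getD jr.toNat [] from
          (PySem.List.getD_map_range mrowi H jr.toNat [] hjeH).symm]
        rw [flatten_set ((List.range H).map mrowi) W jr.toNat jc.toNat _ hmemrow
          (by simp [hpmFlen]; omega) hkeW]
        rw [hflatmap]
      rw [hflatC]
      simp only [Int.toNat_natCast]
      rfl
    · simp only [bStep]
      rw [e_d, e_c, hdata, hcolP, hrowP, hBsums]
      rw [hfc, hfr]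
      dsimp only
      rw [if_pos ⟨by omega, by omega⟩]
      rw [hjre, hjce]
      have e_p : ((jr.toNat : Nat) : Int) * (W : Int) + ((jc.toNat : Nat) : Int)
          = ((W * jr.toNat + jc.toNat : Nat) : Int) := by push_cast; ring
      rw [e_p]
      have hfv : PySem.List.pyGetD (List.map f (List.range (H * W)))
            ((W * jr.toNat + jc.toNat : Nat) : Int) 0
          = gp tp (i + ((W * jr.toNat + jc.toNat : Nat) : Int)) := by
        have hp : W * jr.toNat + jc.toNat < H * W := by
          have h1 : W * jr.toNat + jc.toNat < W * (jr.toNat + 1) := by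
            rw [Nat.mul_succ]; omega
          have h2 : W * (jr.toNat + 1) ≤ W * H := Nat.mul_le_mul_left W hjeH
          have h3 : W * H = H * W := Nat.mul_comm W H
          omega
        have h0 := gp_map_range (H * W) f (W * jr.toNat + jc.toNat) hp
        simp only [gp] at h0
        exact h0
      rw [hfv]
      rw [PySem.List.pySetD_natCast (List.map f (List.range (H * W))) (W * jr.toNat + jc.toNat) _]
      simp only [Int.toNat_natCast]
      rfl

-- invariant over the first N blocks: A's decoded array is B's output followed by zeros
lemma blocks_inv (tp : List Int) (H W M : Nat) (hW : 1 ≤ W)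
    (hlen : tp.length = M * (H * W + W + H)) :
    ∀ N, N ≤ M →
    ∃ pm pc pr out,
      pm.length = H ∧ (∀ r ∈ pm, r.length = W) ∧ pc.length = W ∧ pr.length = H ∧
      out.length = N * (H * W) ∧
      ((List.range N).map (fun n => (((H * W + W + H) * n : Nat) : Int))).foldl
          (aStep tp (H : Int) (W : Int))
          ((PySem.List.pyRange 0 (H : Int) 1).map
              (fun _ => (PySem.List.pyRange 0 (W : Int) 1).map (fun _ => (0 : Int))),
            (PySem.List.pyRange 0 (W : Int) 1).map (fun _ => (0 : Int)),
            (PySem.List.pyRange 0 (H : Int) 1).map (fun _ => (0 : Int)),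
            tp.map (fun _ => (0 : Int)), (0 : Int))
        = (pm, pc, pr, out ++ List.replicate (tp.length - N * (H * W)) 0, (N : Int)) ∧
      ((List.range N).map (fun n => (((H * W + W + H) * n : Nat) : Int))).foldl
          (bStep tp (H : Int) (W : Int)) [] = out := by
  intro N
  induction N with
  | zero =>
    intro _
    refine ⟨(PySem.List.pyRange 0 (H : Int) 1).map
        (fun _ => (PySem.List.pyRange 0 (W : Int) 1).map (fun _ => (0 : Int))),
      (PySem.List.pyRange 0 (W : Int) 1).map (fun _ => (0 : Int)),
      (PySem.List.pyRange 0 (H : Int) 1).map (fun _ => (0 : Int)), [],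
      ?_, ?_, ?_, ?_, by simp, ?_, rfl⟩
    · simp [PySem.List.length_pyRange_one]
    · intro r hr
      simp only [List.mem_map] at hr
      obtain ⟨_, _, rfl⟩ := hr
      simp [PySem.List.length_pyRange_one]
    · simp [PySem.List.length_pyRange_one]
    · simp [PySem.List.length_pyRange_one]
    · simp [List.map_const']
  | succ N ih =>
    intro hNM
    obtain ⟨pm, pc, pr, out, h1, h2, h3, h4, h5, hA, hB⟩ := ih (by omega)
    have hlen' : (H * W + W + H) * (N + 1) ≤ tp.length := by
      calc (H * W + W + H) * (N + 1) ≤ (H * W + W + H) * M := Nat.mul_le_mul_left _ hNM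
        _ = M * (H * W + W + H) := Nat.mul_comm _ _
        _ = tp.length := hlen.symm
    obtain ⟨pm', pc', pr', blk, k1, k2, k3, k4, k5, kA, kB⟩ :=
      step_eq tp H W N hW hlen' pm pc pr out h1 h2 h3 h4 h5
    refine ⟨pm', pc', pr', out ++ blk, k1, k2, k3, k4, ?_, ?_, ?_⟩
    · simp only [List.length_append, h5, k5]
      have e : (N + 1) * (H * W) = N * (H * W) + H * W := by ring
      omega
    · rw [List.range_succ, List.map_append, List.foldl_append, hA]
      simp only [List.map_cons, List.map_nil, List.foldl_cons, List.foldl_nil]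
      rw [kA]
      have e : ((N : Int) + 1) = ((N + 1 : Nat) : Int) := by push_cast; ring
      rw [e]
    · rw [List.range_succ, List.map_append, List.foldl_append, hB]
      simp only [List.map_cons, List.map_nil, List.foldl_cons, List.foldl_nil]
      exact kB

lemma pyRange_nil_of_nonpos (b s : Int) (hb : 0 ≤ b) (hs : s < 0) :
    PySem.List.pyRange 0 b s = [] := by
  simp only [PySem.List.pyRange]
  rw [if_neg (by omega)]
  rw [if_neg (by omega), if_neg (by omega)]
  simp

-- ===== VERDICT (by name: the statement is the Claim_ definition above) =====
theorem decode_packet_spec : Claim_equal_decode_packet := by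
  intro tp h w hdom hpre
  rcases hpre with ⟨hh, hw, hmod⟩ | hneg | ⟨hpos, hnil⟩
  · -- the real block decoding: height ≥ 0, width ≥ 1, length a multiple of the block size
    obtain ⟨H, rfl⟩ : ∃ H : Nat, h = (H : Int) := ⟨h.toNat, by omega⟩
    obtain ⟨W, rfl⟩ : ∃ W : Nat, w = (W : Int) := ⟨w.toNat, by omega⟩
    have hW : 1 ≤ W := by exact_mod_cast hw
    have hC : ((H : Int) * W + W + H) = ((H * W + W + H : Nat) : Int) := by push_cast; ring
    rw [hC] at hmod
    have hdvdN : (H * W + W + H) ∣ tp.length := by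
      exact_mod_cast (PySem.Int.mod_eq_zero_iff_dvd _ _).mp hmod
    obtain ⟨M, hM⟩ := hdvdN
    have hlen : tp.length = M * (H * W + W + H) := by rw [hM]; ring
    obtain ⟨pm, pc, pr, out, h1, h2, h3, h4, h5, hA, hB⟩ :=
      blocks_inv tp H W M hW hlen M le_rfl
    have hle : M * (H * W) ≤ tp.length := by
      calc M * (H * W) ≤ M * (H * W + W + H) := Nat.mul_le_mul_left _ (by omega)
        _ = tp.length := hlen.symm
    have hrange : PySem.List.pyRange 0 (tp.length : Int) ((H : Int) * W + W + H)
        = (List.range M).map (fun n => (((H * W + W + H) * n : Nat) : Int)) := by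
      rw [hC, show ((tp.length : Nat) : Int) = ((M * (H * W + W + H) : Nat) : Int) from by rw [hlen]]
      exact pyRange_step M (H * W + W + H) (by omega)
    simp only [Spec_decode_packet, decode_packet, decode_packet_alt]
    rw [hrange, hA, hB]
    simp only []
    rw [h5]
    rw [show ((tp.length : Int) - ((M * (H * W) : Nat) : Int)).toNat = tp.length - M * (H * W) from by
      omega]
  · -- negative coded block size: range(0, len, c) is empty on both sides
    have hnil : PySem.List.pyRange 0 (tp.length : Int) (h * w + w + h) = [] :=
      pyRange_nil_of_nonpos _ _ (by positivity) hneg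
    simp only [Spec_decode_packet, decode_packet, decode_packet_alt]
    rw [hnil]
    simp [List.map_const']
  · -- empty packet with positive coded block size: range(0, 0, c) is empty on both sides
    subst hnil
    have hnil0 : PySem.List.pyRange 0 ((0 : Nat) : Int) (h * w + w + h) = [] := by
      rw [PySem.List.pyRange_of_pos _ _ hpos]
      simp
    simp only [Spec_decode_packet, decode_packet, decode_packet_alt]
    simp only [List.length_nil]
    rw [hnil0]
    simp
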